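-- pv_equiv track=rewrite | github.com/suuppon/AlgorithmPS | 프로그래머스/3/258709. 주사위 고르기/주사위 고르기.py | calc_win
-- ===== SOURCE A (Python) =====
-- def calc_win(a_score_list, b_score_list):
--     a_score_list.sort()
--     b_score_list.sort()
--
--     a_win = 0
--     b_idx = 0
--
--     for a in a_score_list:
--         while b_idx < len(b_score_list) and b_score_list[b_idx] < a:
--             b_idx += 1
--         a_win += b_idx
--
--     return a_win
-- ===== SOURCE B (Python) =====
-- def calc_win(a_score_list, b_score_list):
--     a_score_list.sort()
--     b_score_list.sort()
--     total = 0
--     for a in a_score_list: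
--         # bisect_left: number of elements of the sorted b-list strictly below a
--         lo, hi = 0, len(b_score_list)
--         while lo < hi:
--             mid = (lo + hi) // 2
--             if b_score_list[mid] < a:
--                 lo = mid + 1
--             else:
--                 hi = mid
--         total += lo
--     return total
-- ===== Notes on version B (the rewrite author's own statement) =====
-- stated objective: alternative
-- what changed: Replaces A's single non-resetting two-pointer sweep (shared mutable b_idx across the a-loop) by an independent binary search (bisect_left, hand-rolled since A imports nothing) into the sorted b-list for each a; both lists are still sorted in place, preserving A's argument mutation.
import Mathlib
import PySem

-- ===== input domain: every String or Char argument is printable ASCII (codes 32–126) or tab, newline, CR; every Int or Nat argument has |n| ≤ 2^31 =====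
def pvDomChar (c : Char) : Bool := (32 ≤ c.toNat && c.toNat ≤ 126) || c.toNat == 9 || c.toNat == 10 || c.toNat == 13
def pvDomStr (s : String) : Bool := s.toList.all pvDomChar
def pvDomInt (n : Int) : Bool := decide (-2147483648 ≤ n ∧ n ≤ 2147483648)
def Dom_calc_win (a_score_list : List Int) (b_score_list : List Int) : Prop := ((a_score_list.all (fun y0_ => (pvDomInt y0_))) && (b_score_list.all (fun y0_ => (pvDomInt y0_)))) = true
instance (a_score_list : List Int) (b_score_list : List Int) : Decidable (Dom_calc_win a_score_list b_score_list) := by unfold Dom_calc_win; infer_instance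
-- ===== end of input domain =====

-- B replaces A's single non-resetting two-pointer sweep by an independent binary search
-- (bisect_left) into the sorted b-list for each a; both A and B sort BOTH argument lists in
-- place, so the mutation side effect is identical and the equivalence is about the return value.

-- ===== PORT A =====
-- A's inner while loop: advance i while i < len(bs) and bs[i] < x
def pvAdv (bs : List Int) (x : Int) (i : Nat) : Nat :=
  if h : i < bs.length then
    if bs[i] < x then pvAdv bs x (i + 1) else i
  else i
termination_by bs.length - i

def calc_win (a_score_list : List Int) (b_score_list : List Int) : Int :=
  let sa := PySem.List.sorted a_score_list (fun x => x) false
  let sb := PySem.List.sorted b_score_list (fun x => x) false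
  -- a_win = 0; b_idx = 0; for a in sa: while …: b_idx += 1; a_win += b_idx
  (sa.foldl (fun (st : Int × Nat) x =>
      let j := pvAdv sb x st.2
      (st.1 + (j : Int), j)) ((0 : Int), (0 : Nat))).1

-- ===== PORT B =====
-- B's inner while loop (bisect_left): lo, hi = 0, len(bs); while lo < hi: …
-- bs.getD mid 0 is exact for Python's bs[mid]: the loop keeps mid < hi ≤ len(bs).
def pvBisect (bs : List Int) (x : Int) (lo hi : Nat) : Nat :=
  if lo < hi then
    let mid := (lo + hi) / 2
    if bs.getD mid 0 < x then pvBisect bs x (mid + 1) hi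
    else pvBisect bs x lo mid
  else lo
termination_by hi - lo
decreasing_by all_goals omega

def calc_win_alt (a_score_list : List Int) (b_score_list : List Int) : Int :=
  let sa := PySem.List.sorted a_score_list (fun x => x) false
  let sb := PySem.List.sorted b_score_list (fun x => x) false
  -- total = 0; for a in sa: total += bisect_left(sb, a)
  sa.foldl (fun total x => total + (pvBisect sb x 0 sb.length : Int)) 0

-- ===== PRECONDITION & SPEC =====
def Spec_calc_win (a_score_list : List Int) (b_score_list : List Int) (out : Int) : Prop := out = calc_win_alt a_score_list b_score_list
instance (a_score_list : List Int) (b_score_list : List Int) (out : Int) : Decidable (Spec_calc_win a_score_list b_score_list out) := by unfold Spec_calc_win; infer_instance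

-- ===== CLAIM (what is proved, stated in full; the proofs are below) =====
def Claim_equal_calc_win : Prop := ∀ (a_score_list : List Int) (b_score_list : List Int), Dom_calc_win a_score_list b_score_list → Spec_calc_win a_score_list b_score_list (calc_win a_score_list b_score_list)

-- ===== LEMMAS AND PROOFS =====

-- number of elements of bs strictly below x
def pvCnt (bs : List Int) (x : Int) : Nat := bs.countP (fun y => decide (y < x))

theorem pvCnt_le_length (bs : List Int) (x : Int) : pvCnt bs x ≤ bs.length :=
  List.countP_le_length

theorem pvCnt_mono (bs : List Int) {x x' : Int} (h : x ≤ x') : pvCnt bs x ≤ pvCnt bs x' := by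
  apply List.countP_mono_left
  intro y _ hy
  simp only [decide_eq_true_eq] at hy ⊢
  omega

theorem pvCnt_ge (bs : List Int) (x : Int) (i : Nat)
    (hp : bs.Pairwise (· ≤ ·)) (hi : i < bs.length) (hx : bs[i] < x) :
    i + 1 ≤ pvCnt bs x := by
  have hsplit : bs = bs.take (i + 1) ++ bs.drop (i + 1) := (List.take_append_drop _ _).symm
  have htake : (bs.take (i + 1)).countP (fun y => decide (y < x)) = i + 1 := by
    rw [List.countP_eq_length.mpr, List.length_take]
    · omega
    · intro y hy
      rcases List.mem_iff_getElem.mp hy with ⟨j, hj, rfl⟩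
      have hjlen : j < bs.length := by rw [List.length_take] at hj; omega
      rw [List.getElem_take]
      have hji : j ≤ i := by simp [List.length_take] at hj; omega
      have : bs[j] ≤ bs[i] := by
        rcases Nat.lt_or_ge j i with hlt | hge
        · exact List.pairwise_iff_getElem.mp hp j i hjlen hi hlt
        · have : j = i := by omega
          subst this; exact le_refl _
      simp only [decide_eq_true_eq]
      omega
  calc i + 1 = (bs.take (i + 1)).countP (fun y => decide (y < x)) := htake.symm
    _ ≤ pvCnt bs x := by
        unfold pvCnt
        conv_rhs => rw [hsplit]
        rw [List.countP_append]
        omega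

theorem pvCnt_le (bs : List Int) (x : Int) (i : Nat)
    (hp : bs.Pairwise (· ≤ ·)) (hi : i < bs.length) (hx : x ≤ bs[i]) :
    pvCnt bs x ≤ i := by
  have hsplit : bs = bs.take i ++ bs.drop i := (List.take_append_drop _ _).symm
  have hdrop : (bs.drop i).countP (fun y => decide (y < x)) = 0 := by
    rw [List.countP_eq_zero]
    intro y hy
    rcases List.mem_iff_getElem.mp hy with ⟨j, hj, rfl⟩
    rw [List.length_drop] at hj
    rw [List.getElem_drop]
    have hij : i ≤ i + j := Nat.le_add_right _ _
    have hlen : i + j < bs.length := by omega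
    have : bs[i] ≤ bs[i + j] := by
      rcases Nat.lt_or_ge i (i + j) with hlt | hge
      · exact List.pairwise_iff_getElem.mp hp i (i + j) hi hlen hlt
      · have : i + j = i := by omega
        simp [this]
    simp only [decide_eq_true_eq]
    omega
  have htake : (bs.take i).countP (fun y => decide (y < x)) ≤ i := by
    calc (bs.take i).countP (fun y => decide (y < x)) ≤ (bs.take i).length :=
          List.countP_le_length
      _ ≤ i := by simp [List.length_take]
  unfold pvCnt
  conv_lhs => rw [hsplit]
  rw [List.countP_append]
  omega

-- on a sorted bs, the non-resetting advance from any i ≤ pvCnt lands exactly at pvCnt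
theorem pvAdv_eq (bs : List Int) (x : Int) (hp : bs.Pairwise (· ≤ ·)) (i : Nat)
    (hi : i ≤ pvCnt bs x) : pvAdv bs x i = pvCnt bs x := by
  unfold pvAdv
  split
  · rename_i h1
    split
    · rename_i h2
      exact pvAdv_eq bs x hp (i + 1) (pvCnt_ge bs x i hp h1 h2)
    · rename_i h2
      have := pvCnt_le bs x i hp h1 (by omega)
      omega
  · rename_i h1
    have := pvCnt_le_length bs x
    omega
termination_by bs.length - i

-- on a sorted bs, the binary search lands exactly at pvCnt
theorem pvBisect_eq (bs : List Int) (x : Int) (hp : bs.Pairwise (· ≤ ·)) (lo hi : Nat)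
    (h1 : lo ≤ pvCnt bs x) (h2 : pvCnt bs x ≤ hi) (h3 : hi ≤ bs.length) :
    pvBisect bs x lo hi = pvCnt bs x := by
  unfold pvBisect
  split
  · rename_i hlt
    have hmid : (lo + hi) / 2 < bs.length := by omega
    have hget : bs.getD ((lo + hi) / 2) 0 = bs[(lo + hi) / 2] := List.getD_eq_getElem bs 0 hmid
    dsimp only
    split
    · rename_i hb
      rw [hget] at hb
      exact pvBisect_eq bs x hp ((lo + hi) / 2 + 1) hi
        (pvCnt_ge bs x _ hp hmid hb) h2 h3
    · rename_i hb
      rw [hget] at hb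
      exact pvBisect_eq bs x hp lo ((lo + hi) / 2)
        h1 (pvCnt_le bs x _ hp hmid (by omega)) (by omega)
  · omega
termination_by hi - lo
decreasing_by all_goals omega

-- A's fold over a sorted sa accumulates the pvCnt values
theorem outer_fold_eq (bs : List Int) (hpb : bs.Pairwise (· ≤ ·)) :
    ∀ (sa : List Int), sa.Pairwise (· ≤ ·) →
    ∀ (s : Int) (i : Nat), (∀ x ∈ sa, i ≤ pvCnt bs x) →
    (sa.foldl (fun (st : Int × Nat) x =>
        let j := pvAdv bs x st.2
        (st.1 + (j : Int), j)) (s, i)).1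
      = sa.foldl (fun acc x => acc + (pvCnt bs x : Int)) s := by
  intro sa
  induction sa with
  | nil => intro _ s i _; simp
  | cons x t ih =>
      intro hps s i hle
      have hx : i ≤ pvCnt bs x := hle x (by simp)
      have hadv : pvAdv bs x i = pvCnt bs x := pvAdv_eq bs x hpb i hx
      simp only [List.foldl_cons, hadv]
      apply ih (List.Pairwise.of_cons hps) (s + (pvCnt bs x : Int)) (pvCnt bs x)
      intro x' hx'
      exact pvCnt_mono bs ((List.pairwise_cons.mp hps).1 x' hx')

theorem b_fold_eq (bs : List Int) (hp : bs.Pairwise (· ≤ ·)) (sa : List Int) :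
    sa.foldl (fun total x => total + (pvBisect bs x 0 bs.length : Int)) 0
      = sa.foldl (fun acc x => acc + (pvCnt bs x : Int)) 0 := by
  have h : (fun (total : Int) x => total + (pvBisect bs x 0 bs.length : Int))
      = fun acc x => acc + (pvCnt bs x : Int) := by
    funext acc x
    rw [pvBisect_eq bs x hp 0 bs.length (Nat.zero_le _) (pvCnt_le_length bs x) (le_refl _)]
  rw [h]

-- ===== VERDICT (by name: the statement is the Claim_ definition above) =====
theorem calc_win_spec : Claim_equal_calc_win := by
  intro a b _
  unfold Spec_calc_win calc_win calc_win_alt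
  have hpa : (PySem.List.sorted a (fun x => x) false).Pairwise (· ≤ ·) := by
    simpa using PySem.List.sorted_pairwise a (fun x => x)
  have hpb : (PySem.List.sorted b (fun x => x) false).Pairwise (· ≤ ·) := by
    simpa using PySem.List.sorted_pairwise b (fun x => x)
  rw [outer_fold_eq _ hpb _ hpa 0 0 (fun x _ => Nat.zero_le _), b_fold_eq _ hpb]
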